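-- pv_equiv track=rewrite | github.com/imaldiris/folder-for-work | ex11.py | calculate
-- ===== SOURCE A (Python) =====
-- def calculate(max=str, min=str):
--     """Функция, выполняющая поразрядный счёт в обратном порядке, счёт в столбик перевернтуых чисел.
--     Принимает две строки, возвразращает разность по модулю строкой"""
--     result_string = ''
--     key = True  # единица старшего разряда, при отрицательной разности меньшего разряда.
--     for i in range(0, len(min)):
--         result = 0
--         if key is False:
--             result -= 1
--             key = True
--         result += int(max[i]) - int(min[i])
--         if result < 0:
--             result += 10
--             key = False
--         result_string += str(result)
--     return result_string[::-1]
-- ===== SOURCE B (Python) =====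
-- def calculate(max=str, min=str):
--     """Closed-form re-implementation: build the two reversed numbers as integers,
--     subtract once modulo 10**len(min), then emit the digits by divmod."""
--     x = y = 0
--     p = 1
--     for i in range(len(min)):
--         x += int(max[i]) * p
--         y += int(min[i]) * p
--         p *= 10
--     d = (x - y) % p
--     out = ''
--     for _ in range(len(min)):
--         out = str(d % 10) + out
--         d //= 10
--     return out
-- ===== Notes on version B (the rewrite author's own statement) =====
-- stated objective: alternative
-- what changed: A's per-column borrow state machine (conditional -1/+10 with a carry flag, building the string column by column and reversing it) is replaced by one closed-form computation: build the two reversed numbers M and N as integers, take (M - N) mod 10**len(min) with a single subtraction, and emit its digits by repeated divmod.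
import Mathlib
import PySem

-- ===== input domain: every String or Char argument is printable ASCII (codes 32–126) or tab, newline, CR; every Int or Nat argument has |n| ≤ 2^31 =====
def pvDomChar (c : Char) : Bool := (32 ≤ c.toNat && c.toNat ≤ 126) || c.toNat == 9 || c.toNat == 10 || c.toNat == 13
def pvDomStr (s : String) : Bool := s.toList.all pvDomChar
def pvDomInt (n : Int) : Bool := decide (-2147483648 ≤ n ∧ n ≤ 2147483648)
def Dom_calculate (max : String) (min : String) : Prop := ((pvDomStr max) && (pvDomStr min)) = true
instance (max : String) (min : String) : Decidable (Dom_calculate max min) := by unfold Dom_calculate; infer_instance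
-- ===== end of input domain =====

-- B replaces A's per-column borrow state machine by one closed-form subtraction (M−N) mod 10^n
-- followed by digit emission (objective: alternative algorithm, same output, no speed claim).
-- Both ports work on the strings' code points (List Char); int(one-char) is pvInt1.

-- int(s) for a single character, via Python's int(); the default 0 is never reached under Pre_
def pvInt1 (c : Char) : Int := (PySem.Int.ofChars? [c]).getD 0

-- ===== PORT A =====
def calculate (max : String) (min : String) : String :=
  -- result_string = ''; key = True; for i in range(0, len(min)): ...
  let st := (PySem.List.pyRange 0 (PySem.Str.len min) 1).foldl
    (fun (st : List Char × Bool) (i : Int) =>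
      let result : Int := 0
      -- if key is False: result -= 1; key = True
      let rk : Int × Bool := if st.2 = false then (result - 1, true) else (result, st.2)
      -- result += int(max[i]) - int(min[i])
      let result := rk.1 + pvInt1 (PySem.List.pyGetD max.toList i ' ')
                         - pvInt1 (PySem.List.pyGetD min.toList i ' ')
      -- if result < 0: result += 10; key = False
      let rk2 : Int × Bool := if result < 0 then (result + 10, false) else (result, rk.2)
      -- result_string += str(result)
      (st.1 ++ PySem.Int.toChars rk2.1, rk2.2))
    ([], true)
  -- return result_string[::-1]
  String.ofList ((PySem.List.slice? st.1 none none (-1)).getD [])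

-- ===== PORT B =====
def calculate_alt (max : String) (min : String) : String :=
  -- x = y = 0; p = 1; for i in range(len(min)): x += int(max[i])*p; y += int(min[i])*p; p *= 10
  let s1 := (PySem.List.pyRange 0 (PySem.Str.len min) 1).foldl
    (fun (s : Int × Int × Int) (i : Int) =>
      (s.1 + pvInt1 (PySem.List.pyGetD max.toList i ' ') * s.2.2,
       s.2.1 + pvInt1 (PySem.List.pyGetD min.toList i ' ') * s.2.2,
       s.2.2 * 10))
    (0, 0, 1)
  -- d = (x - y) % p
  let d := PySem.Int.mod (s1.1 - s1.2.1) s1.2.2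
  -- out = ''; for _ in range(len(min)): out = str(d % 10) + out; d //= 10
  let s2 := (PySem.List.pyRange 0 (PySem.Str.len min) 1).foldl
    (fun (s : List Char × Int) (_ : Int) =>
      (PySem.Int.toChars (PySem.Int.mod s.2 10) ++ s.1, PySem.Int.floordiv s.2 10))
    ([], d)
  String.ofList s2.1

-- ===== PRECONDITION & SPEC =====
-- Pre_ excludes exactly the inputs where Python A raises: an index out of range
-- (len(max) < len(min), IndexError) or a non-digit among the scanned characters
-- (ValueError from int()). B raises on exactly the same inputs.
def Pre_calculate (max : String) (min : String) : Prop :=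
  min.toList.length ≤ max.toList.length ∧
  min.toList.all PySem.Chars.isdigit = true ∧
  (max.toList.take min.toList.length).all PySem.Chars.isdigit = true
instance (max : String) (min : String) : Decidable (Pre_calculate max min) := by
  unfold Pre_calculate; infer_instance

def pvWitness_calculate : String × String := ("321", "123")

def Spec_calculate (max : String) (min : String) (out : String) : Prop := out = calculate_alt max min
instance (max : String) (min : String) (out : String) : Decidable (Spec_calculate max min out) := by unfold Spec_calculate; infer_instance

-- ===== CLAIM (what is proved, stated in full; the proofs are below) =====
def Claim_equal_calculate : Prop := ∀ (max : String) (min : String), Dom_calculate max min → Pre_calculate max min → Spec_calculate max min (calculate max min)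

-- ===== LEMMAS AND PROOFS =====

-- value of a digit character
def dval (c : Char) : Int := (c.toNat : Int) - 48

-- value of a least-significant-digit-first digit string
def valOf (cs : List Char) : Int := cs.foldr (fun c a => dval c + 10 * a) 0

-- the k least significant decimal digit characters of v, least significant first
def digitsOf : Nat → Int → List Char
  | 0, _ => []
  | k+1, v => PySem.Int.toChars (PySem.Int.mod v 10) ++ digitsOf k (PySem.Int.floordiv v 10)

lemma digit_enum (c : Char) (h : PySem.Chars.isdigit c = true) :
    c ∈ ['0','1','2','3','4','5','6','7','8','9'] := by
  simp only [PySem.Chars.isdigit, Bool.and_eq_true, decide_eq_true_eq] at h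
  obtain ⟨h1, h2⟩ := h
  rw [Char.le_def] at h1 h2
  have h1' : 48 ≤ c.toNat := by exact_mod_cast UInt32.le_iff_toNat_le.mp h1
  have h2' : c.toNat ≤ 57 := by exact_mod_cast UInt32.le_iff_toNat_le.mp h2
  have hc : c = Char.ofNat c.toNat := (Char.ofNat_toNat c).symm
  interval_cases h : c.toNat <;> rw [hc] <;> decide

lemma pvInt1_digit (c : Char) (h : PySem.Chars.isdigit c = true) : pvInt1 c = dval c := by
  have := digit_enum c h
  fin_cases this <;> decide

lemma dval_bounds (c : Char) (h : PySem.Chars.isdigit c = true) : 0 ≤ dval c ∧ dval c ≤ 9 := by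
  have := digit_enum c h
  fin_cases this <;> decide

lemma valOf_snoc (cs : List Char) (c : Char) :
    valOf (cs ++ [c]) = valOf cs + dval c * 10 ^ cs.length := by
  induction cs with
  | nil => simp [valOf]
  | cons d cs ih =>
      simp only [List.cons_append, valOf, List.foldr_cons] at *
      rw [ih]; simp [List.length_cons, pow_succ]; ring

lemma valOf_bounds (cs : List Char) (h : ∀ c ∈ cs, PySem.Chars.isdigit c = true) :
    0 ≤ valOf cs ∧ valOf cs < 10 ^ cs.length := by
  induction cs with
  | nil => simp [valOf]
  | cons d cs ih =>
      have hd := dval_bounds d (h d (by simp))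
      have ih := ih (fun c hc => h c (by simp [hc]))
      simp only [valOf, List.foldr_cons] at *
      constructor
      · omega
      · have : (10:Int) ^ (d :: cs).length = 10 * 10 ^ cs.length := by
          simp [List.length_cons, pow_succ]; ring
        rw [this]; omega

lemma toChars_digit_rev (v : Int) (h0 : 0 ≤ v) (h1 : v < 10) :
    (PySem.Int.toChars v).reverse = PySem.Int.toChars v := by
  interval_cases v <;> decide

lemma digitsOf_snoc (k : Nat) (w r : Int) (hw0 : 0 ≤ w) (hw1 : w < 10 ^ k)
    (hr0 : 0 ≤ r) (hr1 : r < 10) :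
    digitsOf (k + 1) (r * 10 ^ k + w) = digitsOf k w ++ PySem.Int.toChars r := by
  induction k generalizing w with
  | zero =>
      have hw : w = 0 := by
        have h1 : (10:Int) ^ (0:Nat) = 1 := by norm_num
        omega
      subst hw
      simp only [digitsOf, List.nil_append, List.append_nil]
      rw [PySem.Int.mod_eq_emod_of_pos (by norm_num)]
      rw [Int.emod_eq_of_lt (by omega) (by omega)]
      congr 1; omega
  | succ k ih =>
      have hP : (0:Int) < 10 ^ k := by positivity
      set Q := r * 10 ^ k with hQ
      have hmod : PySem.Int.mod (r * 10 ^ (k+1) + w) 10 = PySem.Int.mod w 10 := by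
        rw [PySem.Int.mod_eq_emod_of_pos (by norm_num), PySem.Int.mod_eq_emod_of_pos (by norm_num)]
        have : r * 10 ^ (k+1) + w = w + (Q * 10) := by rw [hQ, pow_succ]; ring
        rw [this]
        omega
      have hdiv : PySem.Int.floordiv (r * 10 ^ (k+1) + w) 10 = Q + PySem.Int.floordiv w 10 := by
        rw [PySem.Int.floordiv_eq_ediv_of_pos (by norm_num), PySem.Int.floordiv_eq_ediv_of_pos (by norm_num)]
        have : r * 10 ^ (k+1) + w = w + (Q * 10) := by rw [hQ, pow_succ]; ring
        rw [this]
        omega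
      have hw10 : 0 ≤ PySem.Int.floordiv w 10 ∧ PySem.Int.floordiv w 10 < 10 ^ k := by
        rw [PySem.Int.floordiv_eq_ediv_of_pos (by norm_num)]
        have h1 : w < 10 ^ (k+1) := hw1
        have h2 : (10:Int) ^ (k+1) = 10 ^ k * 10 := by rw [pow_succ]
        constructor
        · omega
        · have := hP; omega
      have e1 : digitsOf (k+1+1) (r * 10 ^ (k+1) + w)
          = PySem.Int.toChars (PySem.Int.mod (r * 10 ^ (k+1) + w) 10)
            ++ digitsOf (k+1) (PySem.Int.floordiv (r * 10 ^ (k+1) + w) 10) := rfl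
      have e2 : digitsOf (k+1) w
          = PySem.Int.toChars (PySem.Int.mod w 10) ++ digitsOf k (PySem.Int.floordiv w 10) := rfl
      rw [e1, hmod, hdiv, ih _ hw10.1 hw10.2, e2, List.append_assoc]

-- the column step of A, expressed arithmetically
lemma col_step (P e a b : Int) (hP : 0 < P) (he1 : -P < e) (he2 : e < P)
    (ha1 : 0 ≤ a) (ha2 : a ≤ 9) (hb1 : 0 ≤ b) (hb2 : b ≤ 9) :
    ((e + (a - b) * P) % (10 * P)
      = (if a - b - (if e < 0 then (1:Int) else 0) < 0
         then a - b - (if e < 0 then (1:Int) else 0) + 10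
         else a - b - (if e < 0 then (1:Int) else 0)) * P + e % P)
    ∧ (0 ≤ e + (a - b) * P ↔ 0 ≤ a - b - (if e < 0 then (1:Int) else 0)) := by
  set c : Int := if e < 0 then (1:Int) else 0 with hc
  set r : Int := a - b - c with hr
  have hcc : (c = 0 ∧ 0 ≤ e) ∨ (c = 1 ∧ e < 0) := by
    by_cases h : e < 0 <;> simp [hc, h] <;> omega
  have hemod : e % P = e + c * P := by
    rcases hcc with ⟨h0, he⟩ | ⟨h1, he⟩
    · rw [h0, Int.emod_eq_of_lt he he2]; ring
    · rw [h1]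
      have h2 : e % P = (e + P * 1) % P := (Int.add_mul_emod_self_left e P 1).symm
      rw [h2, show e + P * 1 = e + P by ring, Int.emod_eq_of_lt (by omega) (by omega)]
      ring
  set r' : Int := if r < 0 then r + 10 else r with hr'
  set t : Int := if r < 0 then (1:Int) else 0 with ht
  have htt : (t = 0 ∧ 0 ≤ r) ∨ (t = 1 ∧ r < 0) := by
    by_cases h : r < 0 <;> simp [ht, h] <;> omega
  have hr'e : r' = r + 10 * t := by
    by_cases h : r < 0 <;> simp [hr', ht, h]
  have hr'b : 0 ≤ r' ∧ r' ≤ 9 := by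
    rcases hcc with ⟨h0, _⟩ | ⟨h1, _⟩ <;> rcases htt with ⟨ht0, hge⟩ | ⟨ht1, hlt⟩ <;> omega
  have hid : e + (a - b) * P = (r' * P + e % P) + (10 * P) * (-t) := by
    rw [hemod, hr'e, hr]; ring
  have hbound : 0 ≤ r' * P + e % P ∧ r' * P + e % P < 10 * P := by
    have h1 : 0 ≤ e % P ∧ e % P < P := by
      rw [hemod]; rcases hcc with ⟨h0, he⟩ | ⟨h1, he⟩ <;> (first | rw [h0] | rw [h1]) <;> constructor <;> nlinarith
    have h2 : 0 ≤ r' * P := mul_nonneg hr'b.1 hP.le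
    have h3 : r' * P ≤ 9 * P := mul_le_mul_of_nonneg_right hr'b.2 hP.le
    constructor <;> nlinarith
  constructor
  · rw [hid, Int.add_mul_emod_self_left, Int.emod_eq_of_lt hbound.1 hbound.2]
  · have hD : e + (a - b) * P = r * P + (e + c * P) := by rw [hr]; ring
    have hecP : 0 ≤ e + c * P ∧ e + c * P < P := by
      rcases hcc with ⟨h0, he⟩ | ⟨h1, he⟩ <;> (first | rw [h0] | rw [h1]) <;> constructor <;> nlinarith
    rw [hD]
    constructor
    · intro h
      by_contra hneg
      have : r ≤ -1 := by omega
      nlinarith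
    · intro h
      nlinarith

lemma take_snoc {α : Type} (l : List α) (n : Nat) (h : n < l.length) :
    l.take (n + 1) = l.take n ++ [l[n]] := by
  rw [List.take_add_one, List.getElem?_eq_getElem h]
  rfl

-- invariant of A's single loop
lemma loopA (as bs : List Char) (n : Nat) (hn : n ≤ bs.length) (hlen : bs.length ≤ as.length)
    (hdb : ∀ c ∈ bs, PySem.Chars.isdigit c = true)
    (hda : ∀ c ∈ as.take bs.length, PySem.Chars.isdigit c = true) :
    ((PySem.List.pyRange 0 (n : Int) 1).foldl
      (fun (st : List Char × Bool) (i : Int) =>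
        let result : Int := 0
        let rk : Int × Bool := if st.2 = false then (result - 1, true) else (result, st.2)
        let result := rk.1 + pvInt1 (PySem.List.pyGetD as i ' ')
                           - pvInt1 (PySem.List.pyGetD bs i ' ')
        let rk2 : Int × Bool := if result < 0 then (result + 10, false) else (result, rk.2)
        (st.1 ++ PySem.Int.toChars rk2.1, rk2.2))
      ([], true))
    = (digitsOf n ((valOf (as.take n) - valOf (bs.take n)) % (10 ^ n : Int)),
       decide (0 ≤ valOf (as.take n) - valOf (bs.take n))) := by
  induction n with
  | zero =>
      simp [PySem.List.pyRange, valOf, digitsOf]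
  | succ n ih =>
      have hn' : n ≤ bs.length := by omega
      have hna : n < as.length := by omega
      have hnb : n < bs.length := by omega
      have hcast : ((n + 1 : Nat) : Int) = (n : Int) + 1 := by push_cast; ring
      rw [hcast, PySem.List.pyRange_one_succ_right (by positivity), List.foldl_append,
        ih hn']
      simp only [List.foldl_cons, List.foldl_nil]
      rw [PySem.List.pyGetD_ofNat as n ' ' hna, PySem.List.pyGetD_ofNat bs n ' ' hnb]
      have hda' : PySem.Chars.isdigit as[n] = true := by
        refine hda as[n] ?_
        have : (as.take bs.length)[n]'(by simp; omega) = as[n] := List.getElem_take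
        exact this ▸ List.getElem_mem _
      have hdb' : PySem.Chars.isdigit bs[n] = true := hdb bs[n] (List.getElem_mem _)
      rw [pvInt1_digit _ hda', pvInt1_digit _ hdb']
      set P : Int := 10 ^ n with hPdef
      have hP : (0:Int) < P := by positivity
      set X := valOf (as.take n) with hX
      set Y := valOf (bs.take n) with hY
      set a := dval as[n] with ha
      set b := dval bs[n] with hb
      have hXb : 0 ≤ X ∧ X < P := by
        have hsub : ∀ c ∈ as.take n, c ∈ as.take bs.length := by
          intro c hc
          have ht : as.take n = (as.take bs.length).take n := by
            rw [List.take_take, Nat.min_eq_left hn']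
          exact List.mem_of_mem_take (ht ▸ hc)
        have := valOf_bounds (as.take n) (fun c hc => hda c (hsub c hc))
        rwa [List.length_take, Nat.min_eq_left (le_of_lt hna)] at this
      have hYb : 0 ≤ Y ∧ Y < P := by
        have := valOf_bounds (bs.take n)
          (fun c hc => hdb c (List.mem_of_mem_take hc))
        rwa [List.length_take, Nat.min_eq_left (le_of_lt hnb)] at this
      have hab : (0 ≤ a ∧ a ≤ 9) ∧ (0 ≤ b ∧ b ≤ 9) :=
        ⟨dval_bounds _ hda', dval_bounds _ hdb'⟩
      have he1 : -P < X - Y := by omega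
      have he2 : X - Y < P := by omega
      have hcol := col_step P (X - Y) a b hP he1 he2 hab.1.1 hab.1.2 hab.2.1 hab.2.2
      have he' : valOf (as.take (n+1)) - valOf (bs.take (n+1)) = (X - Y) + (a - b) * P := by
        rw [take_snoc as n hna, take_snoc bs n hnb, valOf_snoc, valOf_snoc,
          List.length_take, List.length_take, Nat.min_eq_left (le_of_lt hna),
          Nat.min_eq_left (le_of_lt hnb), hX, hY, ha, hb, hPdef]
        ring
      have hsucc : (10:Int) ^ (n+1) = 10 * P := by rw [pow_succ, hPdef]; ring
      have hvb : 0 ≤ (X - Y) % P ∧ (X - Y) % P < P :=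
        ⟨Int.emod_nonneg _ (ne_of_gt hP), Int.emod_lt_of_pos _ hP⟩
      rw [he', hsucc]
      obtain ⟨hcol1, hcol2⟩ := hcol
      by_cases he : X - Y < 0
      · have hkey : decide (0 ≤ X - Y) = false := by simp; omega
        have hc1 : (if X - Y < 0 then (1:Int) else 0) = 1 := if_pos he
        rw [hc1] at hcol1 hcol2
        simp only [hkey, reduceIte]
        split_ifs with hr
        · have hr2 : a - b - 1 < 0 := by omega
          rw [if_pos hr2] at hcol1
          refine Prod.ext ?_ ?_
          · dsimp only
            rw [hcol1, show (0:Int) - 1 + a - b + 10 = a - b - 1 + 10 by ring]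
            exact (digitsOf_snoc n _ _ hvb.1 hvb.2 (by omega) (by omega)).symm
          · dsimp only
            have h2 : ¬ (0 ≤ X - Y + (a - b) * P) := by rw [hcol2]; omega
            simp [h2]
        · have hr2 : ¬ (a - b - 1 < 0) := by omega
          rw [if_neg hr2] at hcol1
          refine Prod.ext ?_ ?_
          · dsimp only
            rw [hcol1, show (0:Int) - 1 + a - b = a - b - 1 by ring]
            exact (digitsOf_snoc n _ _ hvb.1 hvb.2 (by omega) (by omega)).symm
          · dsimp only
            have h2 : 0 ≤ X - Y + (a - b) * P := by rw [hcol2]; omega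
            simp [h2]
      · have hkey : decide (0 ≤ X - Y) = true := by simp; omega
        have hc1 : (if X - Y < 0 then (1:Int) else 0) = 0 := if_neg he
        rw [hc1] at hcol1 hcol2
        simp only [hkey, reduceIte, Bool.true_eq_false]
        split_ifs with hr
        · have hr2 : a - b - 0 < 0 := by omega
          rw [if_pos hr2] at hcol1
          refine Prod.ext ?_ ?_
          · dsimp only
            rw [hcol1, show (0:Int) + a - b + 10 = a - b - 0 + 10 by ring]
            exact (digitsOf_snoc n _ _ hvb.1 hvb.2 (by omega) (by omega)).symm
          · dsimp only
            have h2 : ¬ (0 ≤ X - Y + (a - b) * P) := by rw [hcol2]; omega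
            simp [h2]
        · have hr2 : ¬ (a - b - 0 < 0) := by omega
          rw [if_neg hr2] at hcol1
          refine Prod.ext ?_ ?_
          · dsimp only
            rw [hcol1, show (0:Int) + a - b = a - b - 0 by ring]
            exact (digitsOf_snoc n _ _ hvb.1 hvb.2 (by omega) (by omega)).symm
          · dsimp only
            have h2 : 0 ≤ X - Y + (a - b) * P := by rw [hcol2]; omega
            simp [h2]

-- invariant of B's first loop
lemma loopB1 (as bs : List Char) (n : Nat) (hn : n ≤ bs.length) (hlen : bs.length ≤ as.length)
    (hdb : ∀ c ∈ bs, PySem.Chars.isdigit c = true)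
    (hda : ∀ c ∈ as.take bs.length, PySem.Chars.isdigit c = true) :
    ((PySem.List.pyRange 0 (n : Int) 1).foldl
      (fun (s : Int × Int × Int) (i : Int) =>
        (s.1 + pvInt1 (PySem.List.pyGetD as i ' ') * s.2.2,
         s.2.1 + pvInt1 (PySem.List.pyGetD bs i ' ') * s.2.2,
         s.2.2 * 10))
      (0, 0, 1))
    = (valOf (as.take n), valOf (bs.take n), (10 ^ n : Int)) := by
  induction n with
  | zero =>
      simp [PySem.List.pyRange, valOf]
  | succ n ih =>
      have hn' : n ≤ bs.length := by omega
      have hna : n < as.length := by omega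
      have hnb : n < bs.length := by omega
      have hcast : ((n + 1 : Nat) : Int) = (n : Int) + 1 := by push_cast; ring
      rw [hcast, PySem.List.pyRange_one_succ_right (by positivity), List.foldl_append,
        ih hn']
      simp only [List.foldl_cons, List.foldl_nil]
      rw [PySem.List.pyGetD_ofNat as n ' ' hna, PySem.List.pyGetD_ofNat bs n ' ' hnb]
      have hda' : PySem.Chars.isdigit as[n] = true := by
        refine hda as[n] ?_
        have : (as.take bs.length)[n]'(by simp; omega) = as[n] := List.getElem_take
        exact this ▸ List.getElem_mem _
      have hdb' : PySem.Chars.isdigit bs[n] = true := hdb bs[n] (List.getElem_mem _)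
      rw [pvInt1_digit _ hda', pvInt1_digit _ hdb',
        take_snoc as n hna, take_snoc bs n hnb, valOf_snoc, valOf_snoc]
      simp only [List.length_take, Nat.min_eq_left hn', Nat.min_eq_left (le_of_lt hna)]
      refine Prod.ext ?_ (Prod.ext ?_ ?_) <;> simp [pow_succ]

-- B's second loop, over any index list, emits the digits of d most significant first
lemma loopB2 (l : List Int) (out0 : List Char) (d : Int) (hd : 0 ≤ d) :
    (l.foldl
      (fun (s : List Char × Int) (_ : Int) =>
        (PySem.Int.toChars (PySem.Int.mod s.2 10) ++ s.1, PySem.Int.floordiv s.2 10))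
      (out0, d)).1
    = (digitsOf l.length d).reverse ++ out0 := by
  induction l generalizing out0 d with
  | nil => simp [digitsOf]
  | cons i l ih =>
      have h10 : (0:Int) < 10 := by norm_num
      have hd' : 0 ≤ PySem.Int.floordiv d 10 := by
        rw [PySem.Int.floordiv_eq_ediv_of_pos h10]; omega
      have hm : 0 ≤ PySem.Int.mod d 10 ∧ PySem.Int.mod d 10 < 10 := by
        rw [PySem.Int.mod_eq_emod_of_pos h10]; omega
      simp only [List.foldl_cons]
      rw [ih _ _ hd']
      simp only [digitsOf, List.length_cons, List.reverse_append,
        toChars_digit_rev _ hm.1 hm.2, List.append_assoc]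

-- ===== VERDICT (by name: the statement is the Claim_ definition above) =====
theorem calculate_spec : Claim_equal_calculate := by
  intro max min hdom hpre
  obtain ⟨hlen, hdb', hda'⟩ := hpre
  have hdb : ∀ c ∈ min.toList, PySem.Chars.isdigit c = true := by
    simpa [List.all_eq_true] using hdb'
  have hda : ∀ c ∈ max.toList.take min.toList.length, PySem.Chars.isdigit c = true := by
    simpa [List.all_eq_true] using hda'
  unfold Spec_calculate calculate calculate_alt
  have hlenmin : PySem.Str.len min = ((min.toList.length : Nat) : Int) := by simp
  rw [hlenmin]
  rw [loopA max.toList min.toList min.toList.length le_rfl hlen hdb hda,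
      loopB1 max.toList min.toList min.toList.length le_rfl hlen hdb hda]
  set n := min.toList.length with hn
  have hP : (0:Int) < 10 ^ n := by positivity
  have hmod : PySem.Int.mod (valOf (max.toList.take n) - valOf (min.toList.take n)) (10 ^ n)
      = (valOf (max.toList.take n) - valOf (min.toList.take n)) % (10 ^ n) :=
    PySem.Int.mod_eq_emod_of_pos hP
  dsimp only
  rw [hmod]
  have hd0 : 0 ≤ (valOf (max.toList.take n) - valOf (min.toList.take n)) % (10 ^ n) :=
    Int.emod_nonneg _ (ne_of_gt hP)
  rw [loopB2 _ [] _ hd0]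
  have hlength : (PySem.List.pyRange 0 (n : Int) 1).length = n := by
    rw [PySem.List.pyRange_zero_natCast]; simp
  rw [hlength, PySem.List.slice?_none_none_neg_one]
  simp
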